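-- pv_equiv track=rewrite | github.com/ShangwenWang/Mario | src/utils.py | getMethodsInterval
-- ===== SOURCE A (Python) =====
-- def getMethodsInterval(src, key=','):
--     res = []
--     pushedFlag = True
--     start = 0
--     for i in range(src.__len__()):
--         if src[i] != key and pushedFlag is True:
--             start = i
--             pushedFlag = False
--         if src[i] == key and pushedFlag is False:
--             res.append((start, i))
--             pushedFlag = True
--     if start < src.__len__() and pushedFlag is False:
--         res.append((start, src.__len__()))
--     return res
-- ===== SOURCE B (Python) =====
-- def getMethodsInterval(src, key=','):
--     res = []
--     i, n = 0, len(src)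
--     while i < n:
--         if src[i] == key:
--             i += 1
--         else:
--             j = i
--             while j < n and src[j] != key:
--                 j += 1
--             res.append((i, j))
--             i = j
--     return res
-- ===== Notes on version B (the rewrite author's own statement) =====
-- stated objective: simpler
-- what changed: Replaced the pushedFlag state machine with tail fix-up by a two-pointer run scan: skip delimiters, scan to the end of each non-delimiter run, append the interval directly.
import Mathlib
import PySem

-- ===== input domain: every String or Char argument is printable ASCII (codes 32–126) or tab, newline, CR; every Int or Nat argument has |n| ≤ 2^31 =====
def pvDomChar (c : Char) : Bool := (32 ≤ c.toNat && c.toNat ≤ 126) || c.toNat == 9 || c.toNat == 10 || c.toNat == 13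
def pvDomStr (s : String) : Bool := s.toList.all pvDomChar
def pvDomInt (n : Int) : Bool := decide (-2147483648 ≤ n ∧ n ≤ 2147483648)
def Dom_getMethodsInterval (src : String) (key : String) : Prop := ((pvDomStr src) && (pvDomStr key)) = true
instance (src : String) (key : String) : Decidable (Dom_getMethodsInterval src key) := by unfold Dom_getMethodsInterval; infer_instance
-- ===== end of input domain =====

-- B replaces A's pushedFlag state machine (with its tail fix-up) by a direct
-- two-pointer run scan: simpler decomposition, same O(n) cost; return value only.

-- ===== PORT A =====
-- one iteration of A's for-loop body; state = (res, pushedFlag, start)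
def stepA (key : String) (st : List (Int × Int) × Bool × Int) (ci : Char × Nat) :
    List (Int × Int) × Bool × Int :=
  let st1 := if String.singleton ci.1 ≠ key ∧ st.2.1 = true
             then (st.1, false, (ci.2 : Int)) else st
  if String.singleton ci.1 = key ∧ st1.2.1 = false
  then (st1.1 ++ [(st1.2.2, (ci.2 : Int))], true, st1.2.2) else st1

def getMethodsInterval (src : String) (key : String) : List (Int × Int) :=
  let n : Int := src.toList.length
  let st := (src.toList.zipIdx).foldl (stepA key) ([], true, 0)
  if st.2.2 < n ∧ st.2.1 = false then st.1 ++ [(st.2.2, n)] else st.1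

-- ===== PORT B =====
-- non-delimiter test (src[j] != key in Source B)
def pB (key : String) (d : Char) : Bool := String.singleton d != key

-- the while-loop of Source B: skip a delimiter, or scan a whole non-delimiter run
def altAux (key : String) : List Char → Int → List (Int × Int)
  | [], _ => []
  | c :: rest, i =>
    if String.singleton c = key then altAux key rest (i + 1)
    else
      let run := (c :: rest).takeWhile (pB key)
      (i, i + run.length) :: altAux key ((c :: rest).dropWhile (pB key)) (i + run.length)
termination_by l => l.length
decreasing_by
  · simp
  · have hc : pB key c = true := by simp [pB]; simpa using (by assumption)
    simp [hc]
    exact List.length_dropWhile_le _ _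

def getMethodsInterval_alt (src : String) (key : String) : List (Int × Int) :=
  altAux key src.toList 0

-- ===== PRECONDITION & SPEC =====
def Spec_getMethodsInterval (src : String) (key : String) (out : List (Int × Int)) : Prop := out = getMethodsInterval_alt src key
instance (src : String) (key : String) (out : List (Int × Int)) : Decidable (Spec_getMethodsInterval src key out) := by unfold Spec_getMethodsInterval; infer_instance

-- ===== CLAIM (what is proved, stated in full; the proofs are below) =====
def Claim_equal_getMethodsInterval : Prop := ∀ (src : String) (key : String), Dom_getMethodsInterval src key → Spec_getMethodsInterval src key (getMethodsInterval src key)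

-- ===== LEMMAS AND PROOFS =====

-- A's finalisation step (the trailing "if start < n and pushedFlag is False")
def finA (n : Int) (st : List (Int × Int) × Bool × Int) : List (Int × Int) :=
  if st.2.2 < n ∧ st.2.1 = false then st.1 ++ [(st.2.2, n)] else st.1

lemma stepA_delim {key : String} {c : Char} (hc : String.singleton c = key)
    (st : List (Int × Int) × Bool × Int) (i : Nat) :
    stepA key st (c, i) =
      if st.2.1 = false then (st.1 ++ [(st.2.2, (i : Int))], true, st.2.2) else st := by
  rcases st with ⟨res, pushed, start⟩
  cases pushed <;> simp [stepA, hc]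

lemma stepA_nondelim {key : String} {c : Char} (hc : ¬ String.singleton c = key)
    (st : List (Int × Int) × Bool × Int) (i : Nat) :
    stepA key st (c, i) =
      if st.2.1 = true then (st.1, false, (i : Int)) else st := by
  rcases st with ⟨res, pushed, start⟩
  cases pushed <;> simp [stepA, hc]

-- the main invariant: A's fold+finalise over the suffix l (indices from k) equals
-- B's run scan, both from the closed state (pushed = true) and, for any open
-- interval started at start < k, from the open state (pushed = false).
lemma invariant (key : String) (l : List Char) :
    ∀ (k : Nat) (res : List (Int × Int)) (start : Int),
      (finA ((k : Int) + l.length) ((l.zipIdx k).foldl (stepA key) (res, true, start))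
        = res ++ altAux key l k) ∧
      (start < (k : Int) →
        finA ((k : Int) + l.length) ((l.zipIdx k).foldl (stepA key) (res, false, start))
          = res ++ (start, (k : Int) + (l.takeWhile (pB key)).length)
              :: altAux key (l.dropWhile (pB key)) ((k : Int) + (l.takeWhile (pB key)).length)) := by
  induction l with
  | nil =>
      intro k res start
      constructor
      · simp [finA, altAux]
      · intro h
        simp [finA, altAux, h]
  | cons c rest ih =>
      intro k res start
      by_cases hc : String.singleton c = key
      · -- delimiter character
        have hpB : pB key c = false := by simp [pB, hc]
        constructor
        · rw [List.zipIdx_cons, List.foldl_cons, stepA_delim hc]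
          norm_num
          have h1 := (ih (k + 1) res start).1
          rw [altAux]
          simp only [hc, if_true]
          push_cast at h1 ⊢
          ring_nf at h1 ⊢
          exact h1
        · intro hlt
          rw [List.zipIdx_cons, List.foldl_cons, stepA_delim hc]
          norm_num
          have h1 := (ih (k + 1) (res ++ [(start, (k : Int))]) start).1
          rw [List.takeWhile_cons, List.dropWhile_cons]
          simp only [hpB, Bool.false_eq_true, if_false, List.length_nil]
          rw [show altAux key (c :: rest) ((k : Int) + (0:Nat)) = altAux key rest ((k : Int) + 1) by
            rw [altAux]; simp [hc]]
          push_cast at h1 ⊢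
          ring_nf at h1 ⊢
          simpa using h1
      · -- non-delimiter character
        have hpB : pB key c = true := by simp [pB, hc]
        constructor
        · rw [List.zipIdx_cons, List.foldl_cons, stepA_nondelim hc]
          norm_num
          have h1 := (ih (k + 1) res (k : Int)).2 (by push_cast; omega)
          rw [altAux]
          simp only [hc, if_false]
          rw [List.takeWhile_cons, List.dropWhile_cons]
          simp only [hpB, if_true, List.length_cons]
          push_cast at h1 ⊢
          ring_nf at h1 ⊢
          exact h1
        · intro hlt
          rw [List.zipIdx_cons, List.foldl_cons, stepA_nondelim hc]
          norm_num
          have h1 := (ih (k + 1) res start).2 (by push_cast; omega)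
          rw [List.takeWhile_cons, List.dropWhile_cons]
          simp only [hpB, if_true, List.length_cons]
          push_cast at h1 ⊢
          ring_nf at h1 ⊢
          exact h1

-- ===== VERDICT (by name: the statement is the Claim_ definition above) =====
theorem getMethodsInterval_spec : Claim_equal_getMethodsInterval := by
  intro src key _
  unfold Spec_getMethodsInterval getMethodsInterval getMethodsInterval_alt
  have h := (invariant key src.toList 0 [] 0).1
  simpa [finA] using h
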